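-- pv_equiv track=rewrite | github.com/ad-freiburg/tokenization-repair | scripts/correct_icdar_ground_truth.py | remove_hyphenation
-- ===== SOURCE A (Python) =====
-- def remove_hyphenation(sequence):
--     i = 0
--     removed = ""
--     while i < len(sequence):
--         if i > 0 and i + 2 < len(sequence) and sequence[i - 1].isalpha() and sequence[i:(i + 2)] in ("- ", "‑ ") \
--                 and sequence[i + 2].isalpha():
--             i += 2
--         else:
--             removed += sequence[i]
--             i += 1
--     return removed
-- ===== SOURCE B (Python) =====
-- def remove_hyphenation(sequence):
--     n = len(sequence)
--     skip = set()
--     for i in range(1, n - 2):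
--         if sequence[i - 1].isalpha() and sequence[i:i + 2] in ("- ", "\u2011 ") \
--                 and sequence[i + 2].isalpha():
--             skip.add(i)
--             skip.add(i + 1)
--     return "".join(c for idx, c in enumerate(sequence) if idx not in skip)
-- ===== Notes on version B (the rewrite author's own statement) =====
-- stated objective: faster
-- what changed: A's fused single-cursor state machine (detect a hyphenation break and jump the cursor while emitting via repeated string concatenation) is replaced by a two-pass decomposition: first collect the index pairs of every break into a set, then build the result once by filtering the enumerated string with a single str.join call.
import Mathlib
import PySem

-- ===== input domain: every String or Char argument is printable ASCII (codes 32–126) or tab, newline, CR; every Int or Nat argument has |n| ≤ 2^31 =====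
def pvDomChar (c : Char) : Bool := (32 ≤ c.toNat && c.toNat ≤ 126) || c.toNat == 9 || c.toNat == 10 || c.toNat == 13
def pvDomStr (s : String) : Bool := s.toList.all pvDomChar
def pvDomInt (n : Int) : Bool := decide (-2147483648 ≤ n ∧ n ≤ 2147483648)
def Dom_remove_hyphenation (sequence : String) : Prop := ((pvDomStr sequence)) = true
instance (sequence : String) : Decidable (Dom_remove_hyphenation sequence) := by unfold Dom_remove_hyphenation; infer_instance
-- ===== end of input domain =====

-- B replaces A's fused detect-and-skip cursor loop (which emits by repeated string
-- concatenation) by a two-pass decomposition — collect the skipped index pairs into a set,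
-- then filter the enumerated string with one join; measured faster at large sizes.

-- ===== PORT A =====
-- A's while loop: cursor i, accumulator `removed`; character reads s[i-1], s[i], s[i+2]
-- are by List.getD at indices the preceding bounds checks keep in range (exact: 0 < i and
-- i + 2 < len hold whenever the read's value matters), the slice s[i:i+2] is PySem slice.
def removeHypLoop (s : List Char) (i : Nat) (removed : List Char) : List Char :=
  if i < s.length then
    if decide (0 < i) && decide (i + 2 < s.length)
        && PySem.Chars.isalpha (s.getD (i - 1) ' ')
        && (decide (PySem.List.slice s (some (i : Int)) (some ((i : Int) + 2)) = "- ".toList)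
            || decide (PySem.List.slice s (some (i : Int)) (some ((i : Int) + 2)) = "‑ ".toList))
        && PySem.Chars.isalpha (s.getD (i + 2) ' ') then
      removeHypLoop s (i + 2) removed
    else
      removeHypLoop s (i + 1) (removed ++ [s.getD i ' '])
  else removed
termination_by s.length - i

def remove_hyphenation (sequence : String) : String :=
  String.mk (removeHypLoop sequence.toList 0 [])

-- ===== PORT B =====
-- the if-condition of B's first-pass loop (bounds are supplied by the loop's range(1, n-2))
def hypMatch (s : List Char) (i : Int) : Bool :=
  PySem.Chars.isalpha (PySem.List.pyGetD s (i - 1) ' ')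
    && (decide (PySem.List.slice s (some i) (some (i + 2)) = "- ".toList)
        || decide (PySem.List.slice s (some i) (some (i + 2)) = "‑ ".toList))
    && PySem.Chars.isalpha (PySem.List.pyGetD s (i + 2) ' ')

-- first pass: skip = {i, i+1 : i in range(1, n-2), pattern matches at i}
def hypSkipSet (s : List Char) : PySem.Set Int :=
  (PySem.List.pyRange 1 ((s.length : Int) - 2) 1).foldl
    (fun sk i => if hypMatch s i then PySem.Set.add (PySem.Set.add sk i) (i + 1) else sk)
    PySem.Set.empty

-- second pass: ''.join(c for idx, c in enumerate(sequence) if idx not in skip)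
def remove_hyphenation_alt (sequence : String) : String :=
  String.mk (((PySem.List.enumerate sequence.toList 0).filter
      (fun p => ! PySem.Set.contains (hypSkipSet sequence.toList) p.1)).map (·.2))

-- ===== PRECONDITION & SPEC =====
def Spec_remove_hyphenation (sequence : String) (out : String) : Prop := out = remove_hyphenation_alt sequence
instance (sequence : String) (out : String) : Decidable (Spec_remove_hyphenation sequence out) := by unfold Spec_remove_hyphenation; infer_instance

-- ===== CLAIM (what is proved, stated in full; the proofs are below) =====
def Claim_equal_remove_hyphenation : Prop := ∀ (sequence : String), Dom_remove_hyphenation sequence → Spec_remove_hyphenation sequence (remove_hyphenation sequence)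

-- ===== LEMMAS AND PROOFS =====

-- the pattern test at a Nat position, bounds included (A's full if-condition)
def matchP (s : List Char) (i : Nat) : Bool :=
  decide (0 < i) && decide (i + 2 < s.length)
    && PySem.Chars.isalpha (s.getD (i - 1) ' ')
    && (decide (PySem.List.slice s (some (i : Int)) (some ((i : Int) + 2)) = "- ".toList)
        || decide (PySem.List.slice s (some (i : Int)) (some ((i : Int) + 2)) = "‑ ".toList))
    && PySem.Chars.isalpha (s.getD (i + 2) ' ')

-- index j is dropped iff a match starts at j or at j-1
def skipP (s : List Char) (j : Nat) : Bool :=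
  matchP s j || (decide (0 < j) && matchP s (j - 1))

-- common middle form: filter s by a predicate on the running index
def tailR (q : Nat → Bool) : List Char → Nat → List Char
  | [], _ => []
  | c :: t, j => if q j then tailR q t (j + 1) else c :: tailR q t (j + 1)

lemma tailR_congr (q q' : Nat → Bool) (h : ∀ j, q j = q' j) :
    ∀ (t : List Char) (j : Nat), tailR q t j = tailR q' t j := by
  intro t
  induction t with
  | nil => intro j; rfl
  | cons c t ih => intro j; simp [tailR, h j, ih]

lemma slice_two (s : List Char) (i : Nat) :
    PySem.List.slice s (some (i : Int)) (some ((i : Int) + 2)) = (s.drop i).take 2 := by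
  have := PySem.List.slice_natCast_add s i 2
  simpa using this

-- characters forced by a match: s[i] ∈ {'-','‑'} and s[i+1] = ' '
lemma matchP_chars (s : List Char) (i : Nat) (h : matchP s i = true) :
    i + 2 < s.length ∧ (s.getD i ' ' = '-' ∨ s.getD i ' ' = '‑') ∧ s.getD (i + 1) ' ' = ' ' := by
  unfold matchP at h
  simp only [Bool.and_eq_true, Bool.or_eq_true, decide_eq_true_eq] at h
  obtain ⟨⟨⟨⟨-, hlen⟩, -⟩, hsl⟩, -⟩ := h
  rw [slice_two] at hsl
  have hd : i < s.length := by omega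
  have h1 : i + 1 < s.length := by omega
  rw [List.drop_eq_getElem_cons hd, List.drop_eq_getElem_cons h1] at hsl
  have g0 : s.getD i ' ' = s[i] := List.getD_eq_getElem s ' ' hd
  have g1 : s.getD (i + 1) ' ' = s[i + 1] := List.getD_eq_getElem s ' ' h1
  have e1 : "- ".toList = ['-', ' '] := rfl
  have e2 : "‑ ".toList = ['‑', ' '] := rfl
  rcases hsl with hsl | hsl
  · rw [e1] at hsl
    simp only [List.take_succ_cons, List.take_zero, List.cons.injEq, and_true] at hsl
    exact ⟨hlen, Or.inl (by rw [g0, hsl.1]), by rw [g1, hsl.2]⟩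
  · rw [e2] at hsl
    simp only [List.take_succ_cons, List.take_zero, List.cons.injEq, and_true] at hsl
    exact ⟨hlen, Or.inr (by rw [g0, hsl.1]), by rw [g1, hsl.2]⟩

-- after a match at i, no match starts at i+1 or i+2
lemma matchP_next (s : List Char) (i : Nat) (h : matchP s i = true) :
    matchP s (i + 1) = false ∧ matchP s (i + 2) = false := by
  obtain ⟨-, hi, hi1⟩ := matchP_chars s i h
  constructor
  · have hci : PySem.Chars.isalpha (s.getD (i + 1 - 1) ' ') = false := by
      rw [show i + 1 - 1 = i from rfl]
      rcases hi with hi | hi <;> rw [hi] <;> decide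
    unfold matchP
    rw [hci]
    simp
  · have hci : PySem.Chars.isalpha (s.getD (i + 2 - 1) ' ') = false := by
      rw [show i + 2 - 1 = i + 1 from rfl, hi1]
      decide
    unfold matchP
    rw [hci]
    simp

-- A's loop emits exactly the characters whose index is outside skipP, from position i on
lemma removeHypLoop_eq (s : List Char) :
    ∀ (n i : Nat) (acc : List Char), s.length - i ≤ n →
      (i = 0 ∨ matchP s (i - 1) = false) →
      removeHypLoop s i acc = acc ++ tailR (skipP s) (s.drop i) i := by
  intro n
  induction n with
  | zero =>
    intro i acc hn _
    have hge : s.length ≤ i := by omega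
    rw [removeHypLoop, if_neg (by omega)]
    simp [List.drop_eq_nil_of_le hge, tailR]
  | succ n ih =>
    intro i acc hn hH
    by_cases hlt : i < s.length
    · rw [removeHypLoop, if_pos hlt]
      by_cases hm : matchP s i = true
      · rw [if_pos (by unfold matchP at hm; exact hm)]
        obtain ⟨hlen, -, -⟩ := matchP_chars s i hm
        obtain ⟨hn1, _⟩ := matchP_next s i hm
        have hdrop : s.drop i = s[i] :: s.drop (i + 1) := List.drop_eq_getElem_cons hlt
        have hdrop1 : s.drop (i + 1) = s[i + 1] :: s.drop (i + 2) :=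
          List.drop_eq_getElem_cons (by omega)
        have hski : skipP s i = true := by unfold skipP; simp [hm]
        have hski1 : skipP s (i + 1) = true := by
          unfold skipP; simp [show i + 1 - 1 = i by omega, hm]
        rw [hdrop, hdrop1]
        rw [ih (i + 2) acc (by omega) (Or.inr (by simpa using hn1))]
        simp [tailR, hski, hski1]
      · rw [if_neg (by unfold matchP at hm; simpa using hm)]
        have hski : skipP s i = false := by
          unfold skipP
          rcases hH with h0 | h0
          · subst h0; simp [hm]
          · simp [hm, h0]
        have hdrop : s.drop i = s[i] :: s.drop (i + 1) := List.drop_eq_getElem_cons hlt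
        have hg : s.getD i ' ' = s[i] := List.getD_eq_getElem s ' ' hlt
        have hsome : s[i]? = some s[i] := List.getElem?_eq_getElem hlt
        rw [ih (i + 1) (acc ++ [s.getD i ' ']) (by omega)
          (Or.inr (by simpa using (Bool.eq_false_iff.mpr hm : matchP s i = false)))]
        rw [hdrop]
        simp [tailR, hski, hsome]
    · rw [removeHypLoop, if_neg hlt]
      have hd0 : s.drop i = ([] : List Char) := List.drop_eq_nil_of_le (by omega)
      simp [hd0, tailR]

-- membership in the foldl-built skip set
lemma mem_skip_foldl (s : List Char) (l : List Int) (sk : PySem.Set Int) (x : Int) :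
    (x ∈ l.foldl
      (fun sk i => if hypMatch s i then PySem.Set.add (PySem.Set.add sk i) (i + 1) else sk) sk)
      ↔ x ∈ sk ∨ ∃ i ∈ l, hypMatch s i = true ∧ (x = i ∨ x = i + 1) := by
  induction l generalizing sk with
  | nil => simp
  | cons a l ih =>
    simp only [List.foldl_cons]
    by_cases hm : hypMatch s a = true
    · rw [if_pos hm, ih]
      simp only [PySem.Set.mem_add, List.mem_cons]
      constructor
      · rintro (((h | h) | h) | ⟨i, hi, hc, hx⟩)
        · exact Or.inl h
        · exact Or.inr ⟨a, Or.inl rfl, hm, Or.inl h⟩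
        · exact Or.inr ⟨a, Or.inl rfl, hm, Or.inr h⟩
        · exact Or.inr ⟨i, Or.inr hi, hc, hx⟩
      · rintro (h | ⟨i, hi, hc, hx⟩)
        · exact Or.inl (Or.inl (Or.inl h))
        · rcases hi with rfl | hi
          · rcases hx with hx | hx
            · exact Or.inl (Or.inl (Or.inr hx))
            · exact Or.inl (Or.inr hx)
          · exact Or.inr ⟨i, hi, hc, hx⟩
    · rw [if_neg hm, ih]
      simp only [List.mem_cons]
      constructor
      · rintro (h | ⟨i, hi, hc, hx⟩)
        · exact Or.inl h
        · exact Or.inr ⟨i, Or.inr hi, hc, hx⟩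
      · rintro (h | ⟨i, hi, hc, hx⟩)
        · exact Or.inl h
        · rcases hi with rfl | hi
          · exact absurd hc hm
          · exact Or.inr ⟨i, hi, hc, hx⟩

-- matchP at a Nat position vs B's hypMatch with the range bounds
lemma matchP_eq_hypMatch (s : List Char) (k : Nat) (h1 : 0 < k) (h2 : k + 2 < s.length) :
    matchP s k = hypMatch s (k : Int) := by
  unfold matchP hypMatch
  have e1 : (k : Int) - 1 = ((k - 1 : Nat) : Int) := by omega
  have e2 : (k : Int) + 2 = ((k + 2 : Nat) : Int) := by omega
  rw [e1, e2, PySem.List.pyGetD_natCast, PySem.List.pyGetD_natCast, ← e2]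
  simp [h1, h2]

lemma contains_skipSet (s : List Char) (j : Nat) :
    PySem.Set.contains (hypSkipSet s) (j : Int) = skipP s j := by
  by_cases h : skipP s j = true
  · rw [h, PySem.Set.contains_iff]
    unfold hypSkipSet
    rw [mem_skip_foldl]
    right
    unfold skipP at h
    simp only [Bool.or_eq_true, Bool.and_eq_true, decide_eq_true_eq] at h
    rcases h with h | ⟨hj, h⟩
    · have hb : 0 < j ∧ j + 2 < s.length := by
        unfold matchP at h
        simp only [Bool.and_eq_true, decide_eq_true_eq] at h
        exact ⟨h.1.1.1.1, h.1.1.1.2⟩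
      refine ⟨(j : Int), ?_, ?_, Or.inl rfl⟩
      · rw [PySem.List.mem_pyRange_one]; omega
      · rw [← matchP_eq_hypMatch s j hb.1 hb.2]; exact h
    · have hb : 0 < j - 1 ∧ (j - 1) + 2 < s.length := by
        unfold matchP at h
        simp only [Bool.and_eq_true, decide_eq_true_eq] at h
        exact ⟨h.1.1.1.1, h.1.1.1.2⟩
      refine ⟨((j - 1 : Nat) : Int), ?_, ?_, Or.inr (by omega)⟩
      · rw [PySem.List.mem_pyRange_one]; omega
      · rw [← matchP_eq_hypMatch s (j - 1) hb.1 hb.2]; exact h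
  · rw [Bool.eq_false_iff.mpr h, Bool.eq_false_iff]
    intro hc
    apply h
    rw [PySem.Set.contains_iff] at hc
    unfold hypSkipSet at hc
    rw [mem_skip_foldl] at hc
    rcases hc with hc | ⟨i, hi, hm, hx⟩
    · simp [PySem.Set.empty] at hc
    · rw [PySem.List.mem_pyRange_one] at hi
      unfold skipP
      rcases hx with hx | hx
      · have hk : i = ((i.toNat : Nat) : Int) := by omega
        have hji : j = i.toNat := by omega
        have hb1 : 0 < i.toNat := by omega
        have hb2 : i.toNat + 2 < s.length := by omega
        rw [hji, matchP_eq_hypMatch s i.toNat hb1 hb2, ← hk, hm]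
        simp
      · have hk : i = ((i.toNat : Nat) : Int) := by omega
        have hji : j - 1 = i.toNat := by omega
        have hj0 : 0 < j := by omega
        have hb1 : 0 < i.toNat := by omega
        have hb2 : i.toNat + 2 < s.length := by omega
        rw [hji, matchP_eq_hypMatch s i.toNat hb1 hb2, ← hk, hm]
        simp [hj0]

-- B's second pass is tailR over the contains test
lemma enum_filter_eq_tailR (q : Int → Bool) :
    ∀ (t : List Char) (k : Nat),
      ((PySem.List.enumerate t (k : Int)).filter (fun p => ! q p.1)).map (·.2)
        = tailR (fun j => q (j : Int)) t k := by
  intro t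
  induction t with
  | nil => intro k; simp [PySem.List.enumerate, tailR]
  | cons c t ih =>
    intro k
    rw [PySem.List.enumerate_cons]
    rw [show (k : Int) + 1 = ((k + 1 : Nat) : Int) from by omega]
    rw [List.filter_cons]
    by_cases hq : q (k : Int) = true
    · rw [show (!q ((k : Int), c).1) = false from by simp [hq]]
      simp only [Bool.false_eq_true, if_false]
      rw [ih (k + 1)]
      simp [tailR, hq]
    · rw [show (!q ((k : Int), c).1) = true from by simp [hq]]
      simp only [if_true]
      rw [List.map_cons, ih (k + 1)]
      simp [tailR, Bool.eq_false_iff.mpr hq]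

-- ===== VERDICT (by name: the statement is the Claim_ definition above) =====
theorem remove_hyphenation_spec : Claim_equal_remove_hyphenation := by
  intro sequence _
  unfold Spec_remove_hyphenation remove_hyphenation remove_hyphenation_alt
  set s := sequence.toList with hs
  congr 1
  rw [removeHypLoop_eq s s.length 0 [] (by omega) (Or.inl rfl)]
  have h0 : ((0 : Int) = ((0 : Nat) : Int)) := rfl
  rw [h0, enum_filter_eq_tailR (fun j => PySem.Set.contains (hypSkipSet s) j) s 0]
  rw [tailR_congr _ (skipP s) (fun j => contains_skipSet s j) s 0]
  simp
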